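-- pv_equiv track=rewrite | github.com/Torfab/adventOfCodeAndOtherEvents | everybodycodes/q19.py | specialOptimizedCycleDetection
-- ===== SOURCE A (Python) =====
-- def specialOptimizedCycleDetection(point, theGrid):
--   i=1
--   result=set()
--   result.add(point)
--   current=theGrid[point]
--   while(current not in result):
--     i=i+1
--     result.add(current)
--     current=theGrid[current]
--
--   return i
-- ===== SOURCE B (Python) =====
-- def specialOptimizedCycleDetection(point, theGrid):
--     xs = [point]
--     for _ in range(len(theGrid)):
--         xs.append(theGrid[xs[-1]])
--     return len(set(xs))
-- ===== Notes on version B (the rewrite author's own statement) =====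
-- stated objective: alternative
-- what changed: Replaces the seen-set while-loop with early exit by a fixed len(theGrid)-step walk collected into a list, returning the number of distinct visited nodes.
import Mathlib
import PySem

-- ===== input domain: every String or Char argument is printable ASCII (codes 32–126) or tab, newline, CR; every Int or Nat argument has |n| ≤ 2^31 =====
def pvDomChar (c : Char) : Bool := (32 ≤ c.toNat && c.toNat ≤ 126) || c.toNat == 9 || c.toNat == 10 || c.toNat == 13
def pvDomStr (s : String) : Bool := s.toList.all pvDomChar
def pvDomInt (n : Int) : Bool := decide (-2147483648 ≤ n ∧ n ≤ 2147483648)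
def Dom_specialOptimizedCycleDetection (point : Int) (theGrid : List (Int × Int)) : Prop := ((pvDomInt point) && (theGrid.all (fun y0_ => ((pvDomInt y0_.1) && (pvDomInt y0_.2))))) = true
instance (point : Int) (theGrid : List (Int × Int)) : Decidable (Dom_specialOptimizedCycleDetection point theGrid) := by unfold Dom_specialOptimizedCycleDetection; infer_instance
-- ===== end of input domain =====

-- B replaces A's seen-set while-loop by a fixed len(theGrid)-step walk and counts the
-- distinct nodes visited (objective: alternative decomposition, same result).

-- ===== PORT A =====
-- while loop of A, fuel-bounded; under Pre_ the fuel never runs out and no lookup misses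
def pvALoop (theGrid : List (Int × Int)) : Nat → Int → PySem.Set Int → Int → Int
  | 0, _, _, _ => 0
  | fuel+1, i, result, current =>
    if PySem.Set.contains result current then i
    else
      match PySem.Dict.get? (PySem.Dict.mk theGrid) current with
      | none => 0  -- KeyError in Python; excluded by Pre_
      | some nxt => pvALoop theGrid fuel (i + 1) (PySem.Set.add result current) nxt

def specialOptimizedCycleDetection (point : Int) (theGrid : List (Int × Int)) : Int :=
  match PySem.Dict.get? (PySem.Dict.mk theGrid) point with
  | none => 0  -- KeyError in Python; excluded by Pre_
  | some current => pvALoop theGrid (theGrid.length + 2) 1 (PySem.Set.add PySem.Set.empty point) current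

-- ===== PORT B =====
-- 'for _ in range(len(theGrid)): xs.append(theGrid[xs[-1]])' — cur tracks xs[-1]
def pvBLoop (theGrid : List (Int × Int)) : Nat → Int → List Int → List Int
  | 0, _, xs => xs
  | k+1, cur, xs =>
    match PySem.Dict.get? (PySem.Dict.mk theGrid) cur with
    | none => xs  -- KeyError in Python; excluded by Pre_
    | some nxt => pvBLoop theGrid k nxt (xs ++ [nxt])

def specialOptimizedCycleDetection_alt (point : Int) (theGrid : List (Int × Int)) : Int :=
  PySem.Set.len (PySem.Set.ofList (pvBLoop theGrid theGrid.length point [point]))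

-- ===== PRECONDITION & SPEC =====
-- the k-th node of the chain from point (none once a lookup has missed)
def pvIter (theGrid : List (Int × Int)) (point : Int) : Nat → Option Int
  | 0 => some point
  | k+1 => (pvIter theGrid point k).bind (fun x => PySem.Dict.get? (PySem.Dict.mk theGrid) x)

-- Pre_ = exactly the inputs where A returns: the first len(theGrid)+1 lookups of the chain
-- all hit keys (then a repeat occurs and A returns; otherwise Python raises KeyError).
def Pre_specialOptimizedCycleDetection (point : Int) (theGrid : List (Int × Int)) : Prop :=
  ∀ k, k ≤ theGrid.length + 1 → (pvIter theGrid point k).isSome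

instance (point : Int) (theGrid : List (Int × Int)) : Decidable (Pre_specialOptimizedCycleDetection point theGrid) := by
  unfold Pre_specialOptimizedCycleDetection; infer_instance

def pvWitness_specialOptimizedCycleDetection : Int × (List (Int × Int)) := (0, [(0, 1), (1, 0)])

def Spec_specialOptimizedCycleDetection (point : Int) (theGrid : List (Int × Int)) (out : Int) : Prop := out = specialOptimizedCycleDetection_alt point theGrid
instance (point : Int) (theGrid : List (Int × Int)) (out : Int) : Decidable (Spec_specialOptimizedCycleDetection point theGrid out) := by unfold Spec_specialOptimizedCycleDetection; infer_instance

-- ===== CLAIM (what is proved, stated in full; the proofs are below) =====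
def Claim_equal_specialOptimizedCycleDetection : Prop := ∀ (point : Int) (theGrid : List (Int × Int)), Dom_specialOptimizedCycleDetection point theGrid → Pre_specialOptimizedCycleDetection point theGrid → Spec_specialOptimizedCycleDetection point theGrid (specialOptimizedCycleDetection point theGrid)

-- ===== LEMMAS AND PROOFS =====

-- the k-th node as a value (meaningful while pvIter is some)
def pvA (theGrid : List (Int × Int)) (point : Int) (k : Nat) : Int :=
  (pvIter theGrid point k).getD 0

theorem pv_iter_some (theGrid : List (Int × Int)) (point : Int)
    (hPre : Pre_specialOptimizedCycleDetection point theGrid) :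
    ∀ k, k ≤ theGrid.length + 1 → pvIter theGrid point k = some (pvA theGrid point k) := by
  intro k hk
  have h := hPre k hk
  cases hit : pvIter theGrid point k with
  | none => rw [hit] at h; simp at h
  | some v => simp [pvA, hit]

theorem pv_step (theGrid : List (Int × Int)) (point : Int)
    (hPre : Pre_specialOptimizedCycleDetection point theGrid) :
    ∀ k, k ≤ theGrid.length →
      PySem.Dict.get? (PySem.Dict.mk theGrid) (pvA theGrid point k) = some (pvA theGrid point (k+1)) := by
  intro k hk
  have h1 := pv_iter_some theGrid point hPre k (by omega)
  have h2 := pv_iter_some theGrid point hPre (k+1) (by omega)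
  rw [show pvIter theGrid point (k+1)
      = (pvIter theGrid point k).bind (fun x => PySem.Dict.get? (PySem.Dict.mk theGrid) x) from rfl,
    h1] at h2
  simpa using h2

theorem pv_repeat_exists (theGrid : List (Int × Int)) (point : Int)
    (hPre : Pre_specialOptimizedCycleDetection point theGrid) :
    ∃ m, m ≤ theGrid.length ∧ ∃ j < m, pvA theGrid point j = pvA theGrid point m := by
  classical
  have hmaps : ∀ k ∈ Finset.range (theGrid.length + 1),
      pvA theGrid point k ∈ (theGrid.map Prod.fst).toFinset := by
    intro k hk
    rw [Finset.mem_range] at hk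
    have hs := pv_step theGrid point hPre k (by omega)
    rw [List.mem_toFinset]
    by_contra hmem
    have : PySem.Dict.get? (PySem.Dict.mk theGrid) (pvA theGrid point k) = none := by
      rw [PySem.Dict.get?_eq_none_iff_not_mem_keys]
      simpa [PySem.Dict.keys] using hmem
    rw [this] at hs; simp at hs
  have hcard : (theGrid.map Prod.fst).toFinset.card < (Finset.range (theGrid.length + 1)).card := by
    have := List.toFinset_card_le (theGrid.map Prod.fst)
    simp only [Finset.card_range, List.length_map] at *
    omega
  obtain ⟨x, hx, y, hy, hxy, heq⟩ :=
    Finset.exists_ne_map_eq_of_card_lt_of_maps_to hcard hmaps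
  rw [Finset.mem_range] at hx hy
  rcases Nat.lt_or_ge x y with h | h
  · exact ⟨y, by omega, x, h, heq⟩
  · have : y < x := by omega
    exact ⟨x, by omega, y, this, heq.symm⟩

-- A's loop returns r, the first index whose node repeats an earlier one
theorem pvALoop_run (theGrid : List (Int × Int)) (point : Int) (r : Nat)
    (hstep : ∀ k, k ≤ theGrid.length →
      PySem.Dict.get? (PySem.Dict.mk theGrid) (pvA theGrid point k) = some (pvA theGrid point (k+1)))
    (hrle : r ≤ theGrid.length)
    (hr : ∃ j < r, pvA theGrid point j = pvA theGrid point r)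
    (hmin : ∀ m, m < r → ¬ ∃ j < m, pvA theGrid point j = pvA theGrid point m) :
    ∀ fuel j, 1 ≤ j → j ≤ r → r - j < fuel →
      pvALoop theGrid fuel (j : Int) ((List.range j).map (pvA theGrid point)) (pvA theGrid point j)
        = (r : Int) := by
  intro fuel
  induction fuel with
  | zero => intro j _ _ h; omega
  | succ fuel ih =>
    intro j hj1 hjr hfuel
    rcases Nat.lt_or_ge j r with hjlt | hge
    · -- j < r : no repeat yet, loop continues
      have hc : PySem.Set.contains ((List.range j).map (pvA theGrid point)) (pvA theGrid point j) = false := by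
        rw [← Bool.not_eq_true, PySem.Set.contains_iff]
        intro hmem
        obtain ⟨i, hi, heq⟩ := List.mem_map.mp hmem
        exact hmin j hjlt ⟨i, List.mem_range.mp hi, heq⟩
      have hstepj := hstep j (by omega)
      have hadd : PySem.Set.add ((List.range j).map (pvA theGrid point)) (pvA theGrid point j)
          = (List.range (j+1)).map (pvA theGrid point) := by
        simp [PySem.Set.add, List.range_succ]
        intro x hx heq
        exact hmin j hjlt ⟨x, hx, heq⟩
      have hrec := ih (j+1) (by omega) (by omega) (by omega)
      simp only [pvALoop, hc, hstepj, Bool.false_eq_true, if_false, hadd]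
      rw [show (j : Int) + 1 = ((j+1 : Nat) : Int) by push_cast; ring]
      exact hrec
    · -- j = r : the current node repeats, return i = r
      have hjeq : j = r := by omega
      subst hjeq
      obtain ⟨i, hi, heq⟩ := hr
      have hc : PySem.Set.contains ((List.range j).map (pvA theGrid point)) (pvA theGrid point j) = true := by
        rw [PySem.Set.contains_iff]
        exact List.mem_map.mpr ⟨i, List.mem_range.mpr hi, heq⟩
      simp only [pvALoop, hc, if_true]

-- B's walk produces exactly the list of the first len(theGrid)+1 chain nodes
theorem pvBLoop_run (theGrid : List (Int × Int)) (point : Int)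
    (hstep : ∀ k, k ≤ theGrid.length →
      PySem.Dict.get? (PySem.Dict.mk theGrid) (pvA theGrid point k) = some (pvA theGrid point (k+1))) :
    ∀ k j, j + k = theGrid.length →
      pvBLoop theGrid k (pvA theGrid point j) ((List.range (j+1)).map (pvA theGrid point))
        = (List.range (theGrid.length + 1)).map (pvA theGrid point) := by
  intro k
  induction k with
  | zero => intro j hj; simp only [pvBLoop]; rw [← hj]
  | succ k ih =>
    intro j hj
    have hstepj := hstep j (by omega)
    have hrec := ih (j+1) (by omega)
    simp only [pvBLoop, hstepj]
    rw [show (List.range (j+1)).map (pvA theGrid point) ++ [pvA theGrid point (j+1)]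
        = (List.range (j+1+1)).map (pvA theGrid point) by simp [List.range_succ]]
    exact hrec

-- dedup of the full walk is the list of the first r (pairwise distinct) nodes
theorem pv_ofList_walk (theGrid : List (Int × Int)) (point : Int) (r : Nat)
    (hrle : r ≤ theGrid.length)
    (hclosure : ∀ m, m ≤ theGrid.length → ∃ j, j < r ∧ pvA theGrid point m = pvA theGrid point j)
    (hmin : ∀ m, m < r → ¬ ∃ j < m, pvA theGrid point j = pvA theGrid point m) :
    PySem.Set.ofList ((List.range (theGrid.length + 1)).map (pvA theGrid point))
      = (List.range r).map (pvA theGrid point) := by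
  have hnodup : ((List.range r).map (pvA theGrid point)).Nodup := by
    refine List.Nodup.map_on ?_ (List.nodup_range)
    intro i hi j hj hij
    rw [List.mem_range] at hi hj
    by_contra hne
    rcases Nat.lt_or_ge i j with h | h
    · exact hmin j hj ⟨i, h, hij⟩
    · exact hmin i hi ⟨j, by omega, hij.symm⟩
  have hsplit : (List.range (theGrid.length + 1)).map (pvA theGrid point)
      = (List.range r).map (pvA theGrid point)
        ++ (List.range (theGrid.length + 1 - r)).map (fun t => pvA theGrid point (r + t)) := by
    rw [show theGrid.length + 1 = r + (theGrid.length + 1 - r) by omega, List.range_add]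
    simp [Function.comp]
  have hfil : List.filter (fun y => !PySem.Set.contains ((List.range r).map (pvA theGrid point)) y)
      (PySem.Set.ofList ((List.range (theGrid.length + 1 - r)).map (fun t => pvA theGrid point (r + t)))) = [] := by
    rw [List.filter_eq_nil_iff]
    intro y hy
    have hy' : y ∈ (List.range (theGrid.length + 1 - r)).map (fun t => pvA theGrid point (r + t)) :=
      (PySem.Set.mem_ofList _ _).mp hy
    obtain ⟨t, ht, hyt⟩ := List.mem_map.mp hy'
    rw [List.mem_range] at ht
    obtain ⟨j, hj, hje⟩ := hclosure (r + t) (by omega)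
    have hmem : ∃ a < r, pvA theGrid point a = y := ⟨j, hj, by rw [← hje, hyt]⟩
    simpa using hmem
  rw [hsplit, PySem.Set.ofList_append, PySem.Set.ofList_eq_self_of_nodup _ hnodup,
    PySem.Set.update_eq_append_filter, hfil, List.append_nil]

-- ===== VERDICT (by name: the statement is the Claim_ definition above) =====
theorem specialOptimizedCycleDetection_spec : Claim_equal_specialOptimizedCycleDetection := by
  intro point theGrid _ hPre
  unfold Spec_specialOptimizedCycleDetection
  classical
  obtain ⟨m0, hm0le, hm0⟩ := pv_repeat_exists theGrid point hPre
  have hQ : ∃ m, ∃ j < m, pvA theGrid point j = pvA theGrid point m := ⟨m0, hm0⟩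
  have hr : ∃ j < Nat.find hQ, pvA theGrid point j = pvA theGrid point (Nat.find hQ) :=
    Nat.find_spec hQ
  have hmin : ∀ m, m < Nat.find hQ → ¬ ∃ j < m, pvA theGrid point j = pvA theGrid point m :=
    fun m hm => Nat.find_min hQ hm
  have hrle : Nat.find hQ ≤ theGrid.length := le_trans (Nat.find_le hm0) hm0le
  have hrpos : 1 ≤ Nat.find hQ := by obtain ⟨j, hj, _⟩ := hr; omega
  have hstep := pv_step theGrid point hPre
  have hclosure : ∀ m, m ≤ theGrid.length →
      ∃ j, j < Nat.find hQ ∧ pvA theGrid point m = pvA theGrid point j := by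
    intro m
    induction m with
    | zero => intro _; exact ⟨0, hrpos, rfl⟩
    | succ m ihm =>
      intro hm
      obtain ⟨k, hk, hke⟩ := ihm (by omega)
      have h1 := hstep m (by omega)
      have h2 := hstep k (by omega)
      rw [hke, h2] at h1
      have heq : pvA theGrid point (m+1) = pvA theGrid point (k+1) := (Option.some.inj h1).symm
      rcases Nat.lt_or_ge (k+1) (Nat.find hQ) with h | h
      · exact ⟨k+1, h, heq⟩
      · have hkr : k + 1 = Nat.find hQ := by omega
        obtain ⟨j, hj, hje⟩ := hr
        exact ⟨j, hj, by rw [heq, hkr]; exact hje.symm⟩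
  have hA : specialOptimizedCycleDetection point theGrid = ((Nat.find hQ : Nat) : Int) := by
    unfold specialOptimizedCycleDetection
    have h0 := hstep 0 (by omega)
    rw [show pvA theGrid point 0 = point from rfl] at h0
    rw [h0]
    have hrun := pvALoop_run theGrid point (Nat.find hQ) hstep hrle hr hmin
      (theGrid.length + 2) 1 le_rfl hrpos (by omega)
    simpa [pvA, pvIter, PySem.Set.add, PySem.Set.empty] using hrun
  have hB : specialOptimizedCycleDetection_alt point theGrid = ((Nat.find hQ : Nat) : Int) := by
    unfold specialOptimizedCycleDetection_alt
    have hwalk := pvBLoop_run theGrid point hstep theGrid.length 0 (by omega)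
    rw [show pvBLoop theGrid theGrid.length point [point]
        = pvBLoop theGrid theGrid.length (pvA theGrid point 0)
            ((List.range (0+1)).map (pvA theGrid point)) by
          simp [pvA, pvIter]]
    rw [hwalk, pv_ofList_walk theGrid point (Nat.find hQ) hrle hclosure hmin]
    simp [PySem.Set.len]
  rw [hA, hB]
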